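-- pv_equiv track=rewrite | github.com/lostmyway02/CSE_318 | heuristics.py | heuristic_6
-- ===== SOURCE A (Python) =====
-- def heuristic_6(board, ai_player):
--     rows = len(board)
--     cols = len(board[0])
--     score = 0
--     edge_cells = []
--
--     # Edge consists of top, bottom, left, right cloumns excluding corners
--     # Top & Bottom
--     for j in range(1, cols - 1):
--         edge_cells.append((0,j))
--         edge_cells.append((rows - 1, j))
--
--     # Left & Right
--     for i in range(1, rows-1):
--         edge_cells.append((i,0))
--         edge_cells.append((i, cols -1))
--
--     for i in range(rows):
--         for j in range(cols):
--             count, owner = board[i][j]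
--             if owner == ai_player:
--                 score -= count  # base score for owning orbs
--
--                 if (i, j) in edge_cells:
--                     score -= 1
--
--             elif owner and owner != ai_player:
--                 score += count
--
--     return score
-- ===== SOURCE B (Python) =====
-- def heuristic_6(board, ai_player):
--     rows = len(board)
--     cols = len(board[0])
--     # Pass 1: base orb score, no edge logic.
--     score = 0
--     for row in board:
--         for j in range(cols):
--             count, owner = row[j]
--             if owner == ai_player:
--                 score -= count
--             elif owner:
--                 score += count
--     # Pass 2: perimeter excluding corners, each distinct cell penalised once.
--     edge = set()
--     for j in range(1, cols - 1):
--         edge.add((0, j))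
--         edge.add((rows - 1, j))
--     if cols:
--         for i in range(1, rows - 1):
--             edge.add((i, 0))
--             edge.add((i, cols - 1))
--     for (i, j) in edge:
--         if board[i][j][1] == ai_player:
--             score -= 1
--     return score
-- ===== Notes on version B (the rewrite author's own statement) =====
-- stated objective: simpler
-- what changed: B splits the single nested loop with an inner edge-list membership test into two independent passes: a plain orb-score sweep over the rows, then a one-penalty-per-cell sweep over the set of distinct perimeter-excluding-corner coordinates.
import Mathlib
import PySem

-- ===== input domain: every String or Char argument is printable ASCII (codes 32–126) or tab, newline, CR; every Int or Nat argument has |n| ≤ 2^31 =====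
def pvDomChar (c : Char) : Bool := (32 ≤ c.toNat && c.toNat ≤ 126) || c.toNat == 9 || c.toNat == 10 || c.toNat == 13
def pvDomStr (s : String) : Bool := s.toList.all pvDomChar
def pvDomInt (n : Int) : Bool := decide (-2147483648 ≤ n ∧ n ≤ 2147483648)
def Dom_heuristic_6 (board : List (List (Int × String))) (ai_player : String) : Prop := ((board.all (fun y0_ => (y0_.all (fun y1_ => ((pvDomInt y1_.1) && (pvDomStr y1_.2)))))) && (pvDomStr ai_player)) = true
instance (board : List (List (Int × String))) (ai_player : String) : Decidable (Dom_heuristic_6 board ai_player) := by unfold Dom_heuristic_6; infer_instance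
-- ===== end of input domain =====

-- B computes the same score in two passes (plain orb sum, then a one-shot penalty over the set of
-- perimeter-minus-corner cells) instead of testing list membership inside the cell loop; objective: simpler decomposition.

-- ===== PORT A =====
def heuristic_6 (board : List (List (Int × String))) (ai_player : String) : Int :=
  let rows : Int := board.length
  let cols : Int := (board.headD []).length
  -- edge_cells built by appending, top/bottom then left/right
  let edge1 : List (Int × Int) :=
    (PySem.List.pyRange 1 (cols - 1)).foldl
      (fun e j => e ++ [((0 : Int), j), (rows - 1, j)]) []
  let edge : List (Int × Int) :=
    (PySem.List.pyRange 1 (rows - 1)).foldl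
      (fun e i => e ++ [(i, (0 : Int)), (i, cols - 1)]) edge1
  (PySem.List.pyRange 0 rows).foldl (fun score i =>
    (PySem.List.pyRange 0 cols).foldl (fun score j =>
      let cell := PySem.List.pyGetD (PySem.List.pyGetD board i []) j (0, "")
      if cell.2 == ai_player then
        let score := score - cell.1
        if (i, j) ∈ edge then score - 1 else score
      else if cell.2 != "" && cell.2 != ai_player then score + cell.1
      else score) score) 0

-- ===== PORT B =====
def heuristic_6_alt (board : List (List (Int × String))) (ai_player : String) : Int :=
  let rows : Int := board.length
  let cols : Int := (board.headD []).length
  -- Pass 1: base orb score, no edge logic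
  let score : Int := board.foldl (fun s row =>
    (PySem.List.pyRange 0 cols).foldl (fun s j =>
      let cell := PySem.List.pyGetD row j (0, "")
      if cell.2 == ai_player then s - cell.1
      else if cell.2 != "" then s + cell.1
      else s) s) 0
  -- Pass 2: distinct perimeter-excluding-corner cells, one penalty each
  let edge : PySem.Set (Int × Int) :=
    (PySem.List.pyRange 1 (cols - 1)).foldl
      (fun e j => (e.add ((0 : Int), j)).add (rows - 1, j)) PySem.Set.empty
  let edge : PySem.Set (Int × Int) :=
    if cols != 0 then
      (PySem.List.pyRange 1 (rows - 1)).foldl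
        (fun e i => (e.add (i, (0 : Int))).add (i, cols - 1)) edge
    else edge
  edge.foldl (fun s c =>
    if (PySem.List.pyGetD (PySem.List.pyGetD board c.1 []) c.2 (0, "")).2 == ai_player
    then s - 1 else s) score

-- ===== PRECONDITION & SPEC =====
-- Pre_ excludes exactly the inputs where Python A raises an IndexError: the empty board
-- (board[0]) and jagged boards with a row shorter than the first row (board[i][j]).
def Pre_heuristic_6 (board : List (List (Int × String))) (ai_player : String) : Prop :=
  board ≠ [] ∧ ∀ row ∈ board, (board.headD []).length ≤ row.length
instance (board : List (List (Int × String))) (ai_player : String) : Decidable (Pre_heuristic_6 board ai_player) := by unfold Pre_heuristic_6; infer_instance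

def pvWitness_heuristic_6 : (List (List (Int × String))) × String :=
  ([[(1, "X"), (2, "")], [(0, "Y"), (3, "X")]], "X")

def Spec_heuristic_6 (board : List (List (Int × String))) (ai_player : String) (out : Int) : Prop := out = heuristic_6_alt board ai_player
instance (board : List (List (Int × String))) (ai_player : String) (out : Int) : Decidable (Spec_heuristic_6 board ai_player out) := by unfold Spec_heuristic_6; infer_instance

-- ===== CLAIM (what is proved, stated in full; the proofs are below) =====
def Claim_equal_heuristic_6 : Prop := ∀ (board : List (List (Int × String))) (ai_player : String), Dom_heuristic_6 board ai_player → Pre_heuristic_6 board ai_player → Spec_heuristic_6 board ai_player (heuristic_6 board ai_player)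

-- ===== LEMMAS AND PROOFS =====

def pvGrid (rows cols : Nat) : List (Int × Int) :=
  (List.range rows).flatMap (fun (i : Nat) => (List.range cols).map (fun (j : Nat) => ((i : Int), (j : Int))))

theorem pv_mem_grid (r c : Nat) (x : Int × Int) :
    x ∈ pvGrid r c ↔ 0 ≤ x.1 ∧ x.1 < (r : Int) ∧ 0 ≤ x.2 ∧ x.2 < (c : Int) := by
  simp only [pvGrid, List.mem_flatMap, List.mem_map, List.mem_range]
  constructor
  · rintro ⟨i, hi, j, hj, rfl⟩
    refine ⟨?_, ?_, ?_, ?_⟩ <;> dsimp only <;> omega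
  · rintro ⟨h1, h2, h3, h4⟩
    refine ⟨x.1.toNat, by omega, x.2.toNat, by omega, ?_⟩
    rw [Prod.ext_iff]; constructor <;> dsimp only <;> omega

theorem pv_grid_nodup (r c : Nat) : (pvGrid r c).Nodup := by
  apply List.nodup_flatMap.mpr
  constructor
  · intro i _
    exact (List.nodup_range).map (fun a b h => by simpa using h)
  · apply List.Pairwise.imp ?_ (List.pairwise_lt_range)
    intro a b hab
    simp only [Function.onFun, List.disjoint_left, List.mem_map, List.mem_range]
    rintro x ⟨j, hj, rfl⟩ ⟨k, hk, hx⟩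
    have : (b : Int) = a := (Prod.ext_iff.mp hx).1
    omega
def pvEA (rows cols : Int) : List (Int × Int) :=
  (PySem.List.pyRange 1 (cols - 1)).flatMap (fun j => [((0 : Int), j), (rows - 1, j)]) ++
  (PySem.List.pyRange 1 (rows - 1)).flatMap (fun i => [(i, (0 : Int)), (i, cols - 1)])

def pvEB (rows cols : Int) : List (Int × Int) :=
  let e1 : PySem.Set (Int × Int) :=
    (PySem.List.pyRange 1 (cols - 1)).foldl
      (fun (e : PySem.Set (Int × Int)) j => (e.add ((0 : Int), j)).add (rows - 1, j)) PySem.Set.empty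
  if cols != 0 then
    (PySem.List.pyRange 1 (rows - 1)).foldl
      (fun (e : PySem.Set (Int × Int)) i => (e.add (i, (0 : Int))).add (i, cols - 1)) e1
  else e1

theorem pv_mem_addfold {β : Type} (f g : β → Int × Int) (l : List β)
    (s : PySem.Set (Int × Int)) (y : Int × Int) :
    y ∈ l.foldl (fun e x => (PySem.Set.add (PySem.Set.add e (f x)) (g x))) s ↔
      y ∈ s ∨ ∃ x ∈ l, y = f x ∨ y = g x := by
  induction l generalizing s with
  | nil => simp
  | cons x t ih => simp [List.foldl_cons, ih, PySem.Set.mem_add, or_assoc]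

theorem pv_nodup_addfold {β : Type} (f g : β → Int × Int) (l : List β)
    (s : PySem.Set (Int × Int)) (hs : s.Nodup) :
    (l.foldl (fun e x => (PySem.Set.add (PySem.Set.add e (f x)) (g x))) s).Nodup := by
  induction l generalizing s with
  | nil => exact hs
  | cons x t ih => exact ih _ (PySem.Set.nodup_add _ _ (PySem.Set.nodup_add _ _ hs))

theorem pv_mem_EA (rows cols : Int) (x : Int × Int) :
    x ∈ pvEA rows cols ↔
      (1 ≤ x.2 ∧ x.2 < cols - 1 ∧ (x.1 = 0 ∨ x.1 = rows - 1)) ∨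
      (1 ≤ x.1 ∧ x.1 < rows - 1 ∧ (x.2 = 0 ∨ x.2 = cols - 1)) := by
  simp only [pvEA, List.mem_append, List.mem_flatMap, PySem.List.mem_pyRange_one,
    List.mem_cons, List.not_mem_nil, or_false]
  constructor
  · rintro (⟨j, hj, h | h⟩ | ⟨i, hi, h | h⟩) <;> subst h <;> simp_all <;> omega
  · rintro (⟨h1, h2, h3 | h3⟩ | ⟨h1, h2, h3 | h3⟩)
    · exact Or.inl ⟨x.2, by omega, by left; rw [Prod.ext_iff]; exact ⟨h3, rfl⟩⟩
    · exact Or.inl ⟨x.2, by omega, by right; rw [Prod.ext_iff]; exact ⟨h3, rfl⟩⟩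
    · exact Or.inr ⟨x.1, by omega, by left; rw [Prod.ext_iff]; exact ⟨rfl, h3⟩⟩
    · exact Or.inr ⟨x.1, by omega, by right; rw [Prod.ext_iff]; exact ⟨rfl, h3⟩⟩

theorem pv_mem_EB (rows cols : Int) (x : Int × Int) :
    x ∈ pvEB rows cols ↔
      (1 ≤ x.2 ∧ x.2 < cols - 1 ∧ (x.1 = 0 ∨ x.1 = rows - 1)) ∨
      (cols ≠ 0 ∧ 1 ≤ x.1 ∧ x.1 < rows - 1 ∧ (x.2 = 0 ∨ x.2 = cols - 1)) := by
  unfold pvEB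
  by_cases hc : cols = 0
  · simp only [hc, bne_self_eq_false, if_neg, Bool.false_eq_true, if_false]
    rw [pv_mem_addfold]
    simp only [PySem.List.mem_pyRange_one]
    constructor
    · rintro (h | ⟨j, hj, h | h⟩)
      · simp [PySem.Set.empty] at h
      · subst h; left; dsimp only; omega
      · subst h; left; dsimp only; omega
    · rintro (⟨h1, h2, h3 | h3⟩ | ⟨h1, _⟩)
      · omega
      · omega
      · exact absurd rfl h1
  · have hbe : (cols != 0) = true := by simp [hc]
    simp only [hbe, if_true]
    rw [pv_mem_addfold, pv_mem_addfold]
    simp only [PySem.List.mem_pyRange_one]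
    constructor
    · rintro ((h | ⟨j, hj, h | h⟩) | ⟨i, hi, h | h⟩)
      · simp [PySem.Set.empty] at h
      · subst h; left; dsimp only; omega
      · subst h; left; dsimp only; omega
      · subst h; right; refine ⟨hc, by dsimp only; omega, by dsimp only; omega, by left; rfl⟩
      · subst h; right; refine ⟨hc, by dsimp only; omega, by dsimp only; omega, by right; rfl⟩
    · rintro (⟨h1, h2, h3 | h3⟩ | ⟨_, h1, h2, h3 | h3⟩)
      · exact Or.inl (Or.inr ⟨x.2, by omega, Or.inl (by rw [Prod.ext_iff]; exact ⟨h3, rfl⟩)⟩)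
      · exact Or.inl (Or.inr ⟨x.2, by omega, Or.inr (by rw [Prod.ext_iff]; exact ⟨h3, rfl⟩)⟩)
      · exact Or.inr ⟨x.1, by omega, Or.inl (by rw [Prod.ext_iff]; exact ⟨rfl, h3⟩)⟩
      · exact Or.inr ⟨x.1, by omega, Or.inr (by rw [Prod.ext_iff]; exact ⟨rfl, h3⟩)⟩

theorem pv_nodup_EB (rows cols : Int) : (pvEB rows cols).Nodup := by
  unfold pvEB
  have h1 : ((PySem.List.pyRange 1 (cols - 1)).foldl
      (fun (e : PySem.Set (Int × Int)) j => (e.add ((0 : Int), j)).add (rows - 1, j)) PySem.Set.empty).Nodup :=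
    pv_nodup_addfold _ _ _ _ (by simp [PySem.Set.empty])
  by_cases hc : cols = 0
  · simpa [hc] using h1
  · have hbe : (cols != 0) = true := by simp [hc]
    simp only [hbe, if_true]
    exact pv_nodup_addfold _ _ _ _ h1

def pvCell (board : List (List (Int × String))) (c : Int × Int) : Int × String :=
  PySem.List.pyGetD (PySem.List.pyGetD board c.1 []) c.2 (0, "")
def pvQ (board : List (List (Int × String))) (ai : String) (c : Int × Int) : Bool :=
  (pvCell board c).2 == ai

theorem pv_count_eq (board : List (List (Int × String))) (ai : String)
    (h1 : board ≠ []) :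
    List.countP
        (fun c => pvQ board ai c &&
          decide (c ∈ pvEA (board.length : Int) ((board.headD []).length : Int)))
        (pvGrid board.length (board.headD []).length)
      = List.countP (pvQ board ai)
          (pvEB (board.length : Int) ((board.headD []).length : Int)) := by
  have hr : 1 ≤ board.length := List.length_pos_iff.mpr h1
  rw [List.countP_eq_length_filter, List.countP_eq_length_filter]
  rw [← List.toFinset_card_of_nodup ((pv_grid_nodup _ _).filter _),
      ← List.toFinset_card_of_nodup ((pv_nodup_EB _ _).filter _)]
  congr 1
  apply Finset.ext
  intro x
  simp only [List.mem_toFinset, List.mem_filter, Bool.and_eq_true, decide_eq_true_eq]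
  rw [pv_mem_grid, pv_mem_EA, pv_mem_EB]
  constructor
  · rintro ⟨⟨g1, g2, g3, g4⟩, hq, hmem⟩
    refine ⟨?_, hq⟩
    rcases hmem with h | h
    · exact Or.inl h
    · exact Or.inr ⟨by omega, h⟩
  · rintro ⟨hmem, hq⟩
    rcases hmem with ⟨h1', h2', h3'⟩ | ⟨hc, h1', h2', h3'⟩
    · refine ⟨⟨?_, ?_, ?_, ?_⟩, hq, Or.inl ⟨h1', h2', h3'⟩⟩ <;> omega
    · refine ⟨⟨?_, ?_, ?_, ?_⟩, hq, Or.inr ⟨h1', h2', h3'⟩⟩ <;> omega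
theorem pv_map_getD {α β : Type} (l : List α) (d : α) (F : α → β) :
    (List.range l.length).map (fun i => F (l.getD i d)) = l.map F := by
  apply List.ext_getElem <;> simp [List.getD_eq_getElem?_getD]
  intro i h1 h2
  rw [List.getElem?_eq_getElem h2]; rfl

theorem pv_foldl_shift {β : Type} (f : Int → β → Int) (h : β → Int)
    (hf : ∀ s x, f s x = s + h x) (l : List β) (a : Int) :
    l.foldl f a = a + (l.map h).sum := by
  induction l generalizing a with
  | nil => simp
  | cons x t ih => simp only [List.foldl_cons, List.map_cons, List.sum_cons, ih, hf]; ring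

theorem pv_foldl_pen (p : Int × Int → Bool) (l : List (Int × Int)) (a : Int) :
    l.foldl (fun s c => if p c then s - 1 else s) a = a - List.countP p l := by
  induction l generalizing a with
  | nil => simp
  | cons x t ih =>
    cases hx : p x <;> simp [List.foldl_cons, hx, ih, List.countP_cons] <;> push_cast <;> ring

def pvG (ai : String) (c : Int × String) : Int :=
  if c.2 == ai then -c.1 else if c.2 != "" then c.1 else 0

theorem pv_B_eval (board : List (List (Int × String))) (ai : String) :
    heuristic_6_alt board ai =
      ((pvGrid board.length (board.headD []).length).map (fun c => pvG ai (pvCell board c))).sum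
      - (List.countP (pvQ board ai)
          (pvEB (board.length : Int) ((board.headD []).length : Int)) : Int) := by
  unfold heuristic_6_alt

  rw [pv_foldl_pen (fun c => ((PySem.List.pyGetD (PySem.List.pyGetD board c.1 []) c.2 (0, "")).2 == ai))]
  have hq : (fun c => ((PySem.List.pyGetD (PySem.List.pyGetD board c.1 []) c.2 (0, "")).2 == ai)) = pvQ board ai := rfl
  have he : (if ((((board.headD []).length : Int)) != 0) = true then
        List.foldl (fun (e : PySem.Set (Int × Int)) i => (e.add (i, 0)).add (i, ((board.headD []).length : Int) - 1))
          (List.foldl (fun (e : PySem.Set (Int × Int)) j => (e.add (0, j)).add ((board.length : Int) - 1, j)) PySem.Set.empty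
            (PySem.List.pyRange 1 (((board.headD []).length : Int) - 1)))
          (PySem.List.pyRange 1 ((board.length : Int) - 1))
      else
        List.foldl (fun (e : PySem.Set (Int × Int)) j => (e.add (0, j)).add ((board.length : Int) - 1, j)) PySem.Set.empty
          (PySem.List.pyRange 1 (((board.headD []).length : Int) - 1)))
      = pvEB (board.length : Int) ((board.headD []).length : Int) := rfl
  rw [hq, he]
  congr 1
  -- base pass equals the grid sum
  simp only [PySem.List.pyRange_zero_natCast, List.foldl_map]
  have hf : ∀ (s : Int) (row : List (Int × String)),
      List.foldl
        (fun s (j : Nat) =>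
          if ((PySem.List.pyGetD row (j : Int) (0, "")).2 == ai) = true then s - (PySem.List.pyGetD row (j : Int) (0, "")).1
          else
            if ((PySem.List.pyGetD row (j : Int) (0, "")).2 != "") = true then s + (PySem.List.pyGetD row (j : Int) (0, "")).1
            else s)
        s (List.range (board.headD []).length)
      = s + ((List.range (board.headD []).length).map (fun j => pvG ai (row.getD j (0, "")))).sum := by
    intro s row
    apply pv_foldl_shift
    intro s' j
    simp only [PySem.List.pyGetD_natCast, pvG]
    cases hb : (row.getD j (0, "")).2 == ai <;>
      cases hb2 : ((row.getD j (0, "")).2 != "") <;>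
        simp [hb, hb2, sub_eq_add_neg]
  rw [pv_foldl_shift _ _ hf, zero_add]
  simp only [pvGrid, List.flatMap_def, List.map_flatten, List.sum_flatten, List.map_map]
  simp only [Function.comp_def, pvCell]


  simp only [List.map_map, Function.comp_def, PySem.List.pyGetD_natCast]
  rw [pv_map_getD board [] (fun row => ((List.range (board.headD []).length).map (fun j => pvG ai (row.getD j (0, "")))).sum)]

theorem pv_sum_map_sub {α : Type} (l : List α) (f g : α → Int) :
    (l.map (fun x => f x - g x)).sum = (l.map f).sum - (l.map g).sum := by
  induction l with
  | nil => simp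
  | cons x t ih => simp [ih]; ring

theorem pv_A_eval (board : List (List (Int × String))) (ai : String) :
    heuristic_6 board ai =
      ((pvGrid board.length (board.headD []).length).map (fun c => pvG ai (pvCell board c))).sum
      - (List.countP
          (fun c => pvQ board ai c &&
            decide (c ∈ pvEA (board.length : Int) ((board.headD []).length : Int)))
          (pvGrid board.length (board.headD []).length) : Int) := by
  unfold heuristic_6
  dsimp only
  simp only [PySem.List.foldl_append_eq_flatMap, List.nil_append]
  rw [show ((PySem.List.pyRange 1 (((board.headD []).length : Int) - 1)).flatMap (fun j => [((0 : Int), j), ((board.length : Int) - 1, j)]) ++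
      (PySem.List.pyRange 1 ((board.length : Int) - 1)).flatMap (fun i => [(i, (0 : Int)), (i, ((board.headD []).length : Int) - 1)]))
      = pvEA (board.length : Int) ((board.headD []).length : Int) from rfl]
  generalize hE : pvEA (board.length : Int) ((board.headD []).length : Int) = E
  simp only [PySem.List.pyRange_zero_natCast, List.foldl_map]
  have hf : ∀ (s : Int) (i : Nat),
      List.foldl
        (fun s (j : Nat) =>
          if ((PySem.List.pyGetD (PySem.List.pyGetD board (i : Int) []) (j : Int) (0, "")).2 == ai) = true then
            if ((i : Int), (j : Int)) ∈ E then
              s - (PySem.List.pyGetD (PySem.List.pyGetD board (i : Int) []) (j : Int) (0, "")).1 - 1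
            else s - (PySem.List.pyGetD (PySem.List.pyGetD board (i : Int) []) (j : Int) (0, "")).1
          else
            if (((PySem.List.pyGetD (PySem.List.pyGetD board (i : Int) []) (j : Int) (0, "")).2 != "") &&
                ((PySem.List.pyGetD (PySem.List.pyGetD board (i : Int) []) (j : Int) (0, "")).2 != ai)) = true then
              s + (PySem.List.pyGetD (PySem.List.pyGetD board (i : Int) []) (j : Int) (0, "")).1
            else s)
        s (List.range (board.headD []).length)
      = s + ((List.range (board.headD []).length).map (fun (j : Nat) =>
          pvG ai (pvCell board ((i : Int), (j : Int))) -
            (if (pvQ board ai ((i : Int), (j : Int)) &&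
                decide (((i : Int), (j : Int)) ∈ E)) = true
             then 1 else 0))).sum := by
    intro s i
    apply pv_foldl_shift
    intro s' j
    simp only [pvG, pvQ, pvCell]
    split_ifs <;> simp_all [bne] <;> ring
  rw [pv_foldl_shift _ _ hf, zero_add]
  rw [← PySem.List.sum_map_ite_one_zero (fun c => pvQ board ai c && decide (c ∈ E)) (pvGrid board.length (board.headD []).length)]
  simp only [pv_sum_map_sub]
  simp only [pvGrid, List.flatMap_def, List.map_flatten, List.sum_flatten, List.map_map, Function.comp_def]

theorem pv_main (board : List (List (Int × String))) (ai_player : String)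
    (hpre : Pre_heuristic_6 board ai_player) :
    heuristic_6 board ai_player = heuristic_6_alt board ai_player := by
  rw [pv_A_eval, pv_B_eval, pv_count_eq board ai_player hpre.1]

-- ===== VERDICT (by name: the statement is the Claim_ definition above) =====
theorem heuristic_6_spec : Claim_equal_heuristic_6 := by
  intro board ai_player _ hpre
  exact pv_main board ai_player hpre
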